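-- pv_equiv track=rewrite | github.com/maryamghr/TR_analysis | scripts/exact_motif_counts.py | filter_ambiguous_motifs_with_indices
-- ===== SOURCE A (Python) =====
-- def filter_ambiguous_motifs_with_indices(motifs):
--     # Set to keep track of ambiguous indices
--     # two motifs are ambiguous if one is a substr of the other
--     ambiguous_indices = set()
--
--     for i, motif in enumerate(motifs):
--         for j, other_motif in enumerate(motifs):
--             if i != j and motif in other_motif:
--                 ambiguous_indices.add(i)
--                 ambiguous_indices.add(j)
--
--     # Get the indices of non-ambiguous motifs
--     non_ambiguous_indices = [i for i in range(len(motifs)) if i not in ambiguous_indices]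
--
--     return non_ambiguous_indices
-- ===== SOURCE B (Python) =====
-- def filter_ambiguous_motifs_with_indices(motifs):
--     # Substring-indexing instead of all-pairs tests: enumerate every substring of
--     # every motif once, count in how many motifs each string occurs as a substring
--     # (scount) and how many times each motif value occurs (vcount); index i is kept
--     # iff its motif is contained only in itself, has no duplicate, and none of its
--     # substrings (other than itself) is another motif's value.
--     def subs(m):
--         out = {''}
--         for a in range(len(m)):
--             for b in range(a + 1, len(m) + 1):
--                 out.add(m[a:b])
--         return out
--
--     vcount = {}
--     for m in motifs:
--         vcount[m] = vcount.get(m, 0) + 1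
--
--     scount = {}
--     for m in motifs:
--         for s in subs(m):
--             scount[s] = scount.get(s, 0) + 1
--
--     return [i for i, m in enumerate(motifs)
--             if scount.get(m, 0) == 1 and vcount.get(m, 0) == 1
--                and not any(s != m and s in vcount for s in subs(m))]
-- ===== Notes on version B (the rewrite author's own statement) =====
-- stated objective: faster
-- what changed: Replaces A's all-pairs 'motif in other_motif' scan by substring indexing: B enumerates every substring of every motif once into counting dictionaries (scount: in how many motifs a string occurs as substring; vcount: multiplicity of each motif value) and decides each index purely from those counts, with no pairwise test.
import Mathlib
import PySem

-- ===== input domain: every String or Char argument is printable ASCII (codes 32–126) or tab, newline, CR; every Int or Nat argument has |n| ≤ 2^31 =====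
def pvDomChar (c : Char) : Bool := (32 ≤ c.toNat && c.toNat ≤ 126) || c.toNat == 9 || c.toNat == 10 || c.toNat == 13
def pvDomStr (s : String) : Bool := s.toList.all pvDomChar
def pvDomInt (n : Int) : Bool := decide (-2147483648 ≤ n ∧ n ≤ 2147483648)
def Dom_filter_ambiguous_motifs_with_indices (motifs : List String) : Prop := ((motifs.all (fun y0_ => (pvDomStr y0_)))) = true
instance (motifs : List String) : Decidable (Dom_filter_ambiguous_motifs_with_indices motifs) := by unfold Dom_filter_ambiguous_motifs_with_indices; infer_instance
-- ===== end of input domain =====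

-- B replaces A's all-pairs substring tests by substring indexing: it enumerates every
-- substring of every motif once into counting dictionaries and decides each index from
-- those counts; measurably faster when there are many motifs.


-- ===== PORT A =====
-- A-side helper: the 'ambiguous_indices' set built by A's two nested loops
def pvAmb (motifs : List String) : PySem.Set Int :=
  (PySem.List.enumerate motifs).foldl (fun s p =>
    (PySem.List.enumerate motifs).foldl (fun s q =>
      if p.1 != q.1 && PySem.Str.isIn p.2 q.2 then
        PySem.Set.add (PySem.Set.add s p.1) q.1
      else s) s) PySem.Set.empty

def filter_ambiguous_motifs_with_indices (motifs : List String) : List Int :=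
  (PySem.List.pyRange 0 (motifs.length : Int) 1).filter
    (fun i => !(PySem.Set.contains (pvAmb motifs) i))

-- ===== PORT B =====
-- B-side helper: subs(m) — the set of all substrings of m (m[a:b] plus '')
def pvSubs (m : String) : PySem.Set String :=
  (PySem.List.pyRange 0 (PySem.Str.len m) 1).foldl (fun out a =>
    (PySem.List.pyRange (a + 1) (PySem.Str.len m + 1) 1).foldl (fun out b =>
      PySem.Set.add out (PySem.Str.slice m (some a) (some b))) out)
    (PySem.Set.ofList [""])

-- B-side helper: vcount — how many times each motif value occurs
def pvVcount (motifs : List String) : PySem.Dict String Int :=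
  motifs.foldl (fun d m => d.insert m (d.getD m 0 + 1)) PySem.Dict.empty

-- B-side helper: scount — in how many motifs each string occurs as a substring
def pvScount (motifs : List String) : PySem.Dict String Int :=
  motifs.foldl (fun d m =>
    (pvSubs m).foldl (fun d s => d.insert s (d.getD s 0 + 1)) d) PySem.Dict.empty

def filter_ambiguous_motifs_with_indices_alt (motifs : List String) : List Int :=
  ((PySem.List.enumerate motifs).filter (fun p =>
      (pvScount motifs).getD p.2 0 == 1 && (pvVcount motifs).getD p.2 0 == 1 &&
      !((pvSubs p.2).any (fun s => s != p.2 && (pvVcount motifs).contains s)))).map (·.1)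

-- ===== PRECONDITION & SPEC =====
def Spec_filter_ambiguous_motifs_with_indices (motifs : List String) (out : List Int) : Prop := out = filter_ambiguous_motifs_with_indices_alt motifs
instance (motifs : List String) (out : List Int) : Decidable (Spec_filter_ambiguous_motifs_with_indices motifs out) := by unfold Spec_filter_ambiguous_motifs_with_indices; infer_instance

-- ===== CLAIM (what is proved, stated in full; the proofs are below) =====
def Claim_equal_filter_ambiguous_motifs_with_indices : Prop := ∀ (motifs : List String), Dom_filter_ambiguous_motifs_with_indices motifs → Spec_filter_ambiguous_motifs_with_indices motifs (filter_ambiguous_motifs_with_indices motifs)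

-- ===== LEMMAS AND PROOFS =====

-- membership in the inner-loop foldl of A
theorem mem_inner_foldl (l : List (Int × String)) (p : Int × String) (s : PySem.Set Int) (x : Int) :
    x ∈ l.foldl (fun s q =>
        if p.1 != q.1 && PySem.Str.isIn p.2 q.2 then
          PySem.Set.add (PySem.Set.add s p.1) q.1
        else s) s ↔
      x ∈ s ∨ ∃ q ∈ l, (p.1 ≠ q.1 ∧ PySem.Str.isIn p.2 q.2 = true) ∧ (x = p.1 ∨ x = q.1) := by
  induction l generalizing s with
  | nil => simp
  | cons q t ih =>
    rw [List.foldl_cons, List.exists_mem_cons_iff]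
    by_cases hb : (p.1 != q.1 && PySem.Str.isIn p.2 q.2) = true
    · rw [if_pos hb, ih]
      have hc : p.1 ≠ q.1 ∧ PySem.Str.isIn p.2 q.2 = true := by
        simpa [bne_iff_ne] using hb
      rw [PySem.Set.mem_add, PySem.Set.mem_add]
      constructor
      · rintro (((h | h) | h) | hE)
        · exact Or.inl h
        · exact Or.inr (Or.inl ⟨hc, Or.inl h⟩)
        · exact Or.inr (Or.inl ⟨hc, Or.inr h⟩)
        · exact Or.inr (Or.inr hE)
      · rintro (h | ⟨_, h | h⟩ | hE)
        · exact Or.inl (Or.inl (Or.inl h))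
        · exact Or.inl (Or.inl (Or.inr h))
        · exact Or.inl (Or.inr h)
        · exact Or.inr hE
    · rw [if_neg hb, ih]
      have hc : ¬(p.1 ≠ q.1 ∧ PySem.Str.isIn p.2 q.2 = true) := by
        intro h
        exact hb (Bool.and_eq_true .. ▸ ⟨bne_iff_ne.mpr h.1, h.2⟩)
      constructor
      · rintro (h | hE)
        · exact Or.inl h
        · exact Or.inr (Or.inr hE)
      · rintro (h | ⟨hbad, _⟩ | hE)
        · exact Or.inl h
        · exact absurd hbad hc
        · exact Or.inr hE

-- membership in the full nested foldl of A ('ambiguous_indices')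
theorem mem_amb (motifs : List String) (x : Int) :
    x ∈ pvAmb motifs ↔
      ∃ p ∈ PySem.List.enumerate motifs, ∃ q ∈ PySem.List.enumerate motifs,
        (p.1 ≠ q.1 ∧ PySem.Str.isIn p.2 q.2 = true) ∧ (x = p.1 ∨ x = q.1) := by
  have gen : ∀ (l : List (Int × String)) (s : PySem.Set Int),
      x ∈ l.foldl (fun s p =>
        (PySem.List.enumerate motifs).foldl (fun s q =>
          if p.1 != q.1 && PySem.Str.isIn p.2 q.2 then
            PySem.Set.add (PySem.Set.add s p.1) q.1
          else s) s) s ↔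
      x ∈ s ∨ ∃ p ∈ l, ∃ q ∈ PySem.List.enumerate motifs,
        (p.1 ≠ q.1 ∧ PySem.Str.isIn p.2 q.2 = true) ∧ (x = p.1 ∨ x = q.1) := by
    intro l
    induction l with
    | nil => simp
    | cons p t ih =>
      intro s
      rw [List.foldl_cons, ih, mem_inner_foldl, List.exists_mem_cons_iff]
      exact or_assoc
  simpa [pvAmb] using gen (PySem.List.enumerate motifs) PySem.Set.empty

-- the pair (j, motifs[j]) is an entry of enumerate(motifs), and it is the only one with index j
theorem self_mem_enumerate (motifs : List String) (j : Int) (h0 : 0 ≤ j) (h1 : j < (motifs.length : Int)) :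
    (j, PySem.List.pyGetD motifs j "") ∈ PySem.List.enumerate motifs := by
  rw [PySem.List.mem_enumerate_iff]
  refine ⟨j.toNat, by omega, ?_⟩
  rw [PySem.List.pyGetD_eq_getElem motifs "" h0 h1]
  simp [Int.toNat_of_nonneg h0]

theorem enumerate_fst_eq (motifs : List String) (p : Int × String) (j : Int)
    (hp : p ∈ PySem.List.enumerate motifs) (hj : p.1 = j) (h0 : 0 ≤ j) :
    p = (j, PySem.List.pyGetD motifs j "") := by
  rw [PySem.List.mem_enumerate_iff] at hp
  obtain ⟨k, hk, rfl⟩ := hp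
  simp only [zero_add] at hj ⊢
  subst hj
  rw [PySem.List.pyGetD_natCast]
  simp [List.getD_eq_getElem?_getD, hk]

-- A's 'j ambiguous' condition equals a symmetric per-index test
theorem amb_iff_any (motifs : List String) (j : Int) (h0 : 0 ≤ j) (h1 : j < (motifs.length : Int)) :
    ((∃ p ∈ PySem.List.enumerate motifs, ∃ q ∈ PySem.List.enumerate motifs,
        (p.1 ≠ q.1 ∧ PySem.Str.isIn p.2 q.2 = true) ∧ (j = p.1 ∨ j = q.1)) ↔
      (∃ q ∈ PySem.List.enumerate motifs, q.1 ≠ j ∧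
        (PySem.Str.isIn (PySem.List.pyGetD motifs j "") q.2 = true ∨
         PySem.Str.isIn q.2 (PySem.List.pyGetD motifs j "") = true))) := by
  have hself := self_mem_enumerate motifs j h0 h1
  constructor
  · rintro ⟨p, hp, q, hq, ⟨hne, hin⟩, hj | hj⟩
    · have := enumerate_fst_eq motifs p j hp hj.symm h0
      subst this
      exact ⟨q, hq, fun h => hne (h ▸ rfl) |>.elim, Or.inl hin⟩
    · have := enumerate_fst_eq motifs q j hq hj.symm h0
      subst this
      exact ⟨p, hp, fun h => hne (by simp [h]), Or.inr hin⟩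
  · rintro ⟨q, hq, hne, hin | hin⟩
    · exact ⟨(j, PySem.List.pyGetD motifs j ""), hself, q, hq, ⟨fun h => hne (by simp [← h]), hin⟩, Or.inl rfl⟩
    · exact ⟨q, hq, (j, PySem.List.pyGetD motifs j ""), hself, ⟨by simpa using hne, hin⟩, Or.inr rfl⟩

-- B's filter-of-enumerate, projected to indices, is a filter of range(n)
theorem map_fst_filter_enumerate {α : Type} (xs : List α) (p : Int × α → Bool) (d : α) :
    ((PySem.List.enumerate xs).filter p).map (·.1) =
      (PySem.List.pyRange 0 (xs.length : Int) 1).filter (fun j => p (j, PySem.List.pyGetD xs j d)) := by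
  conv_lhs => rw [PySem.List.enumerate_eq_map_pyRange xs d]
  rw [List.filter_map, List.map_map]
  have h1 : ((fun x : Int × α => x.1) ∘ fun j : Int => (j, PySem.List.pyGetD xs j d)) = id := rfl
  rw [h1, List.map_id]
  rfl

-- membership in pvSubs' nested foldl
theorem mem_subs_fold (m : String) (l : List Int) (out : PySem.Set String) (s : String) :
    s ∈ l.foldl (fun out a =>
        (PySem.List.pyRange (a + 1) (PySem.Str.len m + 1) 1).foldl (fun out b =>
          PySem.Set.add out (PySem.Str.slice m (some a) (some b))) out) out ↔
      s ∈ out ∨ ∃ a ∈ l, ∃ b ∈ PySem.List.pyRange (a + 1) (PySem.Str.len m + 1) 1,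
        s = PySem.Str.slice m (some a) (some b) := by
  induction l generalizing out with
  | nil => simp
  | cons a t ih =>
    rw [List.foldl_cons, ih, PySem.Set.mem_foldl_add, List.exists_mem_cons_iff]
    exact or_assoc

-- pvSubs m holds exactly the substrings of m
theorem mem_pvSubs (m : String) (s : String) :
    s ∈ pvSubs m ↔ PySem.Str.isIn s m = true := by
  rw [pvSubs, mem_subs_fold, PySem.Str.isIn_iff_infix]
  constructor
  · rintro (h | ⟨a, ha, b, hb, rfl⟩)
    · have : s = "" := by simpa [PySem.Set.mem_ofList] using h
      subst this
      simp [List.nil_infix]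
    · rw [PySem.List.mem_pyRange_one] at ha hb
      have h0a : 0 ≤ a := ha.1
      have h0b : 0 ≤ b := by omega
      have := PySem.Str.toList_slice m (some a) (some b)
      rw [PySem.Chars.slice_eq_listSlice, PySem.List.slice_toNat _ h0a h0b] at this
      rw [List.infix_iff_prefix_suffix]
      exact ⟨m.toList.drop a.toNat, by rw [this]; exact List.take_prefix _ _, List.drop_suffix _ _⟩
  · intro hinf
    by_cases hs : s = ""
    · exact Or.inl (by simp [hs, PySem.Set.mem_ofList])
    · obtain ⟨t, u, htu⟩ := hinf
      right
      have hslen : 0 < s.toList.length := by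
        cases h : s.toList with
        | nil => exact absurd (by simpa using congrArg String.ofList h) hs
        | cons _ _ => simp [h]
      have hmlen : m.toList.length = t.length + s.toList.length + u.length := by
        rw [← htu]; simp; omega
      refine ⟨(t.length : Int), ?_, (t.length : Int) + (s.toList.length : Int), ?_, ?_⟩
      · rw [PySem.List.mem_pyRange_one, PySem.Str.len]
        constructor
        · omega
        · omega
      · rw [PySem.List.mem_pyRange_one, PySem.Str.len]
        constructor
        · omega
        · omega
      · apply String.toList_inj.mp
        rw [PySem.Str.toList_slice, PySem.Chars.slice_eq_listSlice,
            PySem.List.slice_toNat _ (by positivity) (by positivity)]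
        have ha : ((t.length : Int)).toNat = t.length := by omega
        have hb : ((t.length : Int) + (s.toList.length : Int)).toNat = t.length + s.toList.length := by omega
        rw [ha, hb, ← htu, Nat.add_sub_cancel_left, List.append_assoc, List.drop_left, List.take_left]

-- a fold of Set.add preserves Nodup
theorem nodup_foldl_add {α β : Type} [BEq α] [LawfulBEq α] (l : List β) (f : β → α) :
    ∀ (s : PySem.Set α), s.Nodup → (l.foldl (fun s b => PySem.Set.add s (f b)) s).Nodup := by
  induction l with
  | nil => intro s h; exact h
  | cons b t ih =>
    intro s h
    rw [List.foldl_cons]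
    exact ih _ (PySem.Set.nodup_add _ _ h)

-- pvSubs m has no duplicates (it is a genuine set)
theorem nodup_pvSubs (m : String) : (pvSubs m).Nodup := by
  rw [pvSubs]
  generalize (PySem.List.pyRange 0 (PySem.Str.len m) 1) = l
  have gen : ∀ (out : PySem.Set String), out.Nodup →
      (l.foldl (fun out a =>
        (PySem.List.pyRange (a + 1) (PySem.Str.len m + 1) 1).foldl (fun out b =>
          PySem.Set.add out (PySem.Str.slice m (some a) (some b))) out) out).Nodup := by
    induction l with
    | nil => intro out h; exact h
    | cons a t ih =>
      intro out h
      rw [List.foldl_cons]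
      exact ih _ (nodup_foldl_add _ _ _ h)
  exact gen _ (PySem.Set.nodup_ofList _)

-- vcount is Counter(motifs)
theorem pvVcount_eq_counter (motifs : List String) :
    pvVcount motifs = PySem.Dict.counter motifs := by
  rw [pvVcount, PySem.Dict.foldl_insert_getD_add_one_eq_counter]

-- scount counts, for each string v, the motifs containing v as a substring
theorem pvScount_getD (motifs : List String) (v : String) :
    (pvScount motifs).getD v 0 = (motifs.countP (fun m => PySem.Str.isIn v m) : Int) := by
  rw [pvScount]
  have gen : ∀ (l : List String) (d : PySem.Dict String Int),
      (l.foldl (fun d m =>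
        (pvSubs m).foldl (fun d s => d.insert s (d.getD s 0 + 1)) d) d).getD v 0 =
      d.getD v 0 + (l.countP (fun m => PySem.Str.isIn v m) : Int) := by
    intro l
    induction l with
    | nil => simp
    | cons m t ih =>
      intro d
      rw [List.foldl_cons, ih, PySem.Dict.getD_foldl_insert_add_one]
      have hcount : (pvSubs m).count v = if PySem.Str.isIn v m = true then 1 else 0 := by
        by_cases hv : v ∈ pvSubs m
        · rw [List.count_eq_one_of_mem (nodup_pvSubs m) hv, if_pos ((mem_pvSubs m v).mp hv)]
        · rw [List.count_eq_zero.mpr hv, if_neg (fun h => hv ((mem_pvSubs m v).mpr h))]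
      rw [hcount, List.countP_cons]
      split_ifs with h <;> simp <;> ring
  rw [gen, PySem.Dict.getD_empty]
  ring

-- generic: in a duplicate-free list, 'some OTHER element satisfies p' is 'countP p ≥ 2'
theorem exists_other_iff_two_le_countP {α : Type} [DecidableEq α] (l : List α) (p : α → Bool)
    (x : α) (hl : l.Nodup) (hx : x ∈ l) (hpx : p x = true) :
    ((∃ y ∈ l, y ≠ x ∧ p y = true) ↔ 2 ≤ l.countP p) := by
  have hperm := List.perm_cons_erase hx
  rw [hperm.countP_eq, List.countP_cons, hpx, if_pos rfl]
  have hmem : ∀ y, y ∈ l.erase x ↔ y ≠ x ∧ y ∈ l := fun y => hl.mem_erase_iff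
  constructor
  · rintro ⟨y, hyl, hyx, hpy⟩
    have : 0 < (l.erase x).countP p :=
      List.countP_pos_iff.mpr ⟨y, (hmem y).mpr ⟨hyx, hyl⟩, hpy⟩
    omega
  · intro h2
    have : 0 < (l.erase x).countP p := by omega
    obtain ⟨y, hy, hpy⟩ := List.countP_pos_iff.mp this
    obtain ⟨hyx, hyl⟩ := (hmem y).mp hy
    exact ⟨y, hyl, hyx, hpy⟩

-- enumerate(motifs) has no duplicate entries
theorem nodup_enumerate (motifs : List String) : (PySem.List.enumerate motifs).Nodup :=
  (PySem.List.pairwise_lt_enumerate motifs 0).imp (fun h => by intro e; subst e; omega)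

-- countP over enumerate of a predicate on the value equals countP over the list
theorem countP_enumerate (motifs : List String) (p : String → Bool) :
    (PySem.List.enumerate motifs).countP (fun q => p q.2) = motifs.countP p := by
  conv_rhs => rw [← PySem.List.map_snd_enumerate motifs 0]
  rw [List.countP_map]
  rfl

-- a motif value occurs at some enumerate entry
theorem exists_enumerate_of_mem (motifs : List String) (s : String) (hs : s ∈ motifs) :
    ∃ q ∈ PySem.List.enumerate motifs, q.2 = s := by
  have : s ∈ (PySem.List.enumerate motifs).map (·.2) := by
    rw [PySem.List.map_snd_enumerate]; exact hs
  obtain ⟨q, hq, hq2⟩ := List.mem_map.mp this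
  exact ⟨q, hq, hq2⟩

-- 'another motif contains m_j' is 'scount ≥ 2'
theorem contains_side_iff (motifs : List String) (j : Int) (h0 : 0 ≤ j) (h1 : j < (motifs.length : Int)) :
    ((∃ q ∈ PySem.List.enumerate motifs, q.1 ≠ j ∧
        PySem.Str.isIn (PySem.List.pyGetD motifs j "") q.2 = true) ↔
      2 ≤ motifs.countP (fun m => PySem.Str.isIn (PySem.List.pyGetD motifs j "") m)) := by
  set m := PySem.List.pyGetD motifs j "" with hm
  have hself := self_mem_enumerate motifs j h0 h1
  have hpx : PySem.Str.isIn m m = true :=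
    (PySem.Str.isIn_iff_infix m m).mpr (List.infix_refl _)
  rw [← countP_enumerate motifs (fun m' => PySem.Str.isIn m m')]
  rw [← exists_other_iff_two_le_countP _ _ (j, m) (nodup_enumerate motifs) hself hpx]
  constructor
  · rintro ⟨q, hq, hqj, hin⟩
    exact ⟨q, hq, fun h => hqj (by rw [h]), hin⟩
  · rintro ⟨q, hq, hqx, hin⟩
    refine ⟨q, hq, ?_, hin⟩
    intro hq1
    exact hqx (enumerate_fst_eq motifs q j hq hq1 h0)

-- 'm_j contains another motif' is 'duplicate value or a proper motif-substring'
theorem contained_side_iff (motifs : List String) (j : Int) (h0 : 0 ≤ j) (h1 : j < (motifs.length : Int)) :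
    ((∃ q ∈ PySem.List.enumerate motifs, q.1 ≠ j ∧
        PySem.Str.isIn q.2 (PySem.List.pyGetD motifs j "") = true) ↔
      (2 ≤ motifs.count (PySem.List.pyGetD motifs j "") ∨
       ∃ s ∈ motifs, s ≠ PySem.List.pyGetD motifs j "" ∧
         PySem.Str.isIn s (PySem.List.pyGetD motifs j "") = true)) := by
  set m := PySem.List.pyGetD motifs j "" with hm
  have hself := self_mem_enumerate motifs j h0 h1
  have hcount : motifs.count m = (PySem.List.enumerate motifs).countP (fun q => q.2 == m) := by
    rw [List.count, ← countP_enumerate motifs (fun m' => m' == m)]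
  constructor
  · rintro ⟨q, hq, hqj, hin⟩
    by_cases hqm : q.2 = m
    · left
      rw [hcount]
      rw [← exists_other_iff_two_le_countP _ _ (j, m) (nodup_enumerate motifs) hself (by simp)]
      exact ⟨q, hq, fun h => hqj (by rw [h]), by simp [hqm]⟩
    · right
      refine ⟨q.2, ?_, hqm, hin⟩
      have : q.2 ∈ (PySem.List.enumerate motifs).map (·.2) := List.mem_map_of_mem hq
      rwa [PySem.List.map_snd_enumerate] at this
  · rintro (h2 | ⟨s, hs, hsm, hin⟩)
    · rw [hcount] at h2
      rw [← exists_other_iff_two_le_countP _ _ (j, m) (nodup_enumerate motifs) hself (by simp)] at h2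
      obtain ⟨q, hq, hqx, hq2⟩ := h2
      refine ⟨q, hq, ?_, ?_⟩
      · intro hq1
        exact hqx (enumerate_fst_eq motifs q j hq hq1 h0)
      · have : q.2 = m := by simpa using hq2
        rw [this]
        exact (PySem.Str.isIn_iff_infix m m).mpr (List.infix_refl _)
    · obtain ⟨q, hq, hq2⟩ := exists_enumerate_of_mem motifs s hs
      refine ⟨q, hq, ?_, by rw [hq2]; exact hin⟩
      intro hq1
      have := enumerate_fst_eq motifs q j hq hq1 h0
      rw [this] at hq2
      exact hsm hq2.symm

-- scount/count of m_j are at least 1 (m_j is a substring of and equal to itself)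
theorem one_le_counts (motifs : List String) (j : Int) (h0 : 0 ≤ j) (h1 : j < (motifs.length : Int)) :
    1 ≤ motifs.countP (fun m => PySem.Str.isIn (PySem.List.pyGetD motifs j "") m) ∧
    1 ≤ motifs.count (PySem.List.pyGetD motifs j "") := by
  set m := PySem.List.pyGetD motifs j "" with hm
  have hmem : m ∈ motifs :=
    PySem.List.pyGetD_mem motifs "" (by constructor <;> omega)
  constructor
  · exact List.countP_pos_iff.mpr ⟨m, hmem, (PySem.Str.isIn_iff_infix m m).mpr (List.infix_refl _)⟩
  · exact List.count_pos_iff.mpr hmem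

-- ===== VERDICT (by name: the statement is the Claim_ definition above) =====
theorem filter_ambiguous_motifs_with_indices_spec : Claim_equal_filter_ambiguous_motifs_with_indices := by
  intro motifs _
  unfold Spec_filter_ambiguous_motifs_with_indices
  unfold filter_ambiguous_motifs_with_indices filter_ambiguous_motifs_with_indices_alt
  rw [map_fst_filter_enumerate motifs _ ""]
  apply (List.filter_congr _).symm
  intro j hj
  rw [PySem.List.mem_pyRange_one] at hj
  obtain ⟨h0, h1⟩ := hj
  set m := PySem.List.pyGetD motifs j "" with hm
  rw [Bool.eq_iff_iff]
  have hone := one_le_counts motifs j h0 h1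
  have hsc := pvScount_getD motifs m
  have hvc : (pvVcount motifs).getD m 0 = (motifs.count m : Int) := by
    rw [pvVcount_eq_counter, PySem.Dict.getD_counter]
  have hcont : ∀ s, (pvVcount motifs).contains s = true ↔ s ∈ motifs := by
    intro s
    rw [pvVcount_eq_counter, PySem.Dict.contains_counter, List.contains_iff_mem]
  have hA : ((!(pvAmb motifs).contains j) = true) ↔ ¬ j ∈ pvAmb motifs := by
    simp
  rw [hA, mem_amb, amb_iff_any motifs j h0 h1]
  simp only [Bool.and_eq_true, beq_iff_eq, hsc, hvc, Bool.not_eq_true', List.any_eq_false]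
  rw [← hm]
  have hcsi := contains_side_iff motifs j h0 h1
  have hcdi := contained_side_iff motifs j h0 h1
  rw [← hm] at hcsi hcdi
  constructor
  · rintro ⟨⟨h1c, h2c⟩, h3⟩ ⟨q, hq, hqj, hin | hin⟩
    · have h2le := hcsi.mp ⟨q, hq, hqj, hin⟩
      have h1' : motifs.countP (fun m' => PySem.Str.isIn m m') = 1 := by exact_mod_cast h1c
      omega
    · have hOr := hcdi.mp ⟨q, hq, hqj, hin⟩
      have h2' : motifs.count m = 1 := by exact_mod_cast h2c
      rcases hOr with h2le | ⟨s, hs, hsm, hin2⟩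
      · omega
      · exact (h3 s ((mem_pvSubs m s).mpr hin2)) ⟨bne_iff_ne.mpr hsm, (hcont s).mpr hs⟩
  · intro hno
    rw [← hm] at hone
    have hnc1 : ¬ 2 ≤ motifs.countP (fun m' => PySem.Str.isIn m m') := by
      intro h
      obtain ⟨q, hq, hqj, hin⟩ := hcsi.mpr h
      exact hno ⟨q, hq, hqj, Or.inl hin⟩
    have hnc2 : ¬ (2 ≤ motifs.count m ∨ ∃ s ∈ motifs, s ≠ m ∧ PySem.Str.isIn s m = true) := by
      intro h
      obtain ⟨q, hq, hqj, hin⟩ := hcdi.mpr h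
      exact hno ⟨q, hq, hqj, Or.inr hin⟩
    push_neg at hnc2
    obtain ⟨hnc2a, hnc2b⟩ := hnc2
    refine ⟨⟨?_, ?_⟩, ?_⟩
    · have h1' : motifs.countP (fun m' => PySem.Str.isIn m m') = 1 := by
        have := hone.1; omega
      exact_mod_cast h1'
    · have h2' : motifs.count m = 1 := by
        have := hone.2; omega
      exact_mod_cast h2'
    · rintro s hsub ⟨hne, hconts⟩
      exact hnc2b s ((hcont s).mp hconts) (bne_iff_ne.mp hne) ((mem_pvSubs m s).mp hsub)
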